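-- pv_equiv track=rewrite | github.com/Mushr00ms/fvg-intelligence | logic/main.py | format_period_str
-- ===== SOURCE A (Python) =====
-- def format_period_str(p):
--     """Convert period like '5 years' to short format like '5y'."""
--     replacements = [
--         ("years", "y"), ("year", "y"), ("months", "m"), ("month", "m"),
--         ("weeks", "w"), ("week", "w"), ("days", "d"), ("day", "d"),
--         ("quarters", "q"), ("quarter", "q"),
--     ]
--     result = p.replace(" ", "")
--     for long, short in replacements:
--         result = result.replace(long, short)
--     return result
-- ===== SOURCE B (Python) =====
-- def format_period_str(p):
--     """Convert period like '5 years' to short format like '5y'."""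
--     def scan(s, kw, rep):
--         # one left-to-right pass replacing non-overlapping occurrences of kw by rep
--         out = []
--         i = 0
--         n, k = len(s), len(kw)
--         while i < n:
--             if s.startswith(kw, i):
--                 out.append(rep)
--                 i += k
--             else:
--                 out.append(s[i])
--                 i += 1
--         return "".join(out)
--
--     s = scan(p, " ", "")
--     for unit, letter in (("year", "y"), ("month", "m"), ("week", "w"), ("day", "d"), ("quarter", "q")):
--         s = scan(scan(s, unit + "s", letter), unit, letter)
--     return s
-- ===== Notes on version B (the rewrite author's own statement) =====
-- stated objective: alternative
-- what changed: A's table of ten literal (word, letter) pairs fed to str.replace becomes a hand-written left-to-right scanning substitution (index + startswith, building the output list) driven by five unit stems whose plural keyword is derived by appending the plural suffix.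
import Mathlib
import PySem

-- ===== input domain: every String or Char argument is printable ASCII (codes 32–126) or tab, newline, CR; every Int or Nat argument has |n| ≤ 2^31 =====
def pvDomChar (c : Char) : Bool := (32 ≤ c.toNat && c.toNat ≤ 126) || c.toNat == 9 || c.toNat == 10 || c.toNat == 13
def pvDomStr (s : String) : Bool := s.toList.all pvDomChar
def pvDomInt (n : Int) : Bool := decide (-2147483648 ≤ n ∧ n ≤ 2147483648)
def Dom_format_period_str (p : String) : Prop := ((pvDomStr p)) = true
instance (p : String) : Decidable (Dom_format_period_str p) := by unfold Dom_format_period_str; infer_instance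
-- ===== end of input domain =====

-- B replaces A's table of ten (word, letter) str.replace passes by a hand-written
-- left-to-right scanning substitution driven by five unit stems with derived plurals
-- (objective: alternative; same result, different mechanism).

-- ===== PORT A =====
def pvReplacements : List (String × String) :=
  [("years", "y"), ("year", "y"), ("months", "m"), ("month", "m"),
   ("weeks", "w"), ("week", "w"), ("days", "d"), ("day", "d"),
   ("quarters", "q"), ("quarter", "q")]

def format_period_str (p : String) : String :=
  let result := PySem.Str.replace p " " ""
  pvReplacements.foldl (fun result ls => PySem.Str.replace result ls.1 ls.2) result

-- ===== PORT B =====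
-- Source B's inner `while i < n` scan: fuel = remaining length bounds the loop;
-- `out.append`/`"".join` become direct list construction.
def pvScanGo (kw rep : List Char) : Nat → List Char → List Char
  | 0, s => s
  | _ + 1, [] => []
  | f + 1, c :: t =>
    if kw.isPrefixOf (c :: t) then rep ++ pvScanGo kw rep f (List.drop kw.length (c :: t))
    else c :: pvScanGo kw rep f t

def pvScan (s kw rep : String) : String :=
  String.ofList (pvScanGo kw.toList rep.toList s.toList.length s.toList)

def pvUnits : List (String × String) :=
  [("year", "y"), ("month", "m"), ("week", "w"), ("day", "d"), ("quarter", "q")]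

def pvChain : List (String × String) → String → String
  | [], s => s
  | (unit, letter) :: rest, s => pvChain rest (pvScan (pvScan s (unit ++ "s") letter) unit letter)

def format_period_str_alt (p : String) : String :=
  pvChain pvUnits (pvScan p " " "")

-- ===== PRECONDITION & SPEC =====
def Spec_format_period_str (p : String) (out : String) : Prop := out = format_period_str_alt p
instance (p : String) (out : String) : Decidable (Spec_format_period_str p out) := by unfold Spec_format_period_str; infer_instance

-- ===== CLAIM (what is proved, stated in full; the proofs are below) =====
def Claim_equal_format_period_str : Prop := ∀ (p : String), Dom_format_period_str p → Spec_format_period_str p (format_period_str p)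

-- ===== LEMMAS AND PROOFS =====

theorem replace_go_eq_scanGo (kw rep : List Char) (hkw : kw ≠ []) :
    ∀ (fuel : Nat) (l acc : List Char), l.length ≤ fuel →
      PySem.Chars.replace.go kw rep fuel l acc = acc.reverse ++ pvScanGo kw rep fuel l := by
  intro fuel
  induction fuel with
  | zero =>
    intro l acc h
    have : l = [] := List.eq_nil_of_length_eq_zero (Nat.le_zero.mp h)
    subst this
    simp [PySem.Chars.replace.go, pvScanGo]
  | succ f ih =>
    intro l acc h
    cases l with
    | nil => simp [PySem.Chars.replace.go, pvScanGo]
    | cons c t =>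
      simp only [PySem.Chars.replace.go, pvScanGo]
      split
      · have hkl : 1 ≤ kw.length := by
          cases kw with | nil => exact absurd rfl hkw | cons _ _ => simp
        have hlen : (List.drop kw.length (c :: t)).length ≤ f := by
          simp only [List.length_drop, List.length_cons] at h ⊢
          omega
        rw [ih _ _ hlen]
        simp
      · rw [ih t (c :: acc) (by simpa using h)]
        simp

theorem pvScan_eq_replace (s kw rep : String) (hkw : kw.toList ≠ []) :
    pvScan s kw rep = PySem.Str.replace s kw rep := by
  rw [pvScan, PySem.Str.replace, PySem.Chars.replace]
  rw [if_neg (by simpa [List.isEmpty_iff] using hkw)]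
  rw [replace_go_eq_scanGo _ _ hkw s.toList.length s.toList [] le_rfl]
  simp

-- ===== VERDICT (by name: the statement is the Claim_ definition above) =====
theorem format_period_str_spec : Claim_equal_format_period_str := by
  intro p _
  unfold Spec_format_period_str format_period_str format_period_str_alt pvReplacements pvUnits
  simp only [List.foldl, pvChain]
  rw [pvScan_eq_replace p " " "" (by decide)]
  rw [pvScan_eq_replace _ ("year" ++ "s") "y" (by decide),
      pvScan_eq_replace _ "year" "y" (by decide),
      pvScan_eq_replace _ ("month" ++ "s") "m" (by decide),
      pvScan_eq_replace _ "month" "m" (by decide),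
      pvScan_eq_replace _ ("week" ++ "s") "w" (by decide),
      pvScan_eq_replace _ "week" "w" (by decide),
      pvScan_eq_replace _ ("day" ++ "s") "d" (by decide),
      pvScan_eq_replace _ "day" "d" (by decide),
      pvScan_eq_replace _ ("quarter" ++ "s") "q" (by decide),
      pvScan_eq_replace _ "quarter" "q" (by decide)]
  rw [show ("year" ++ "s" : String) = "years" from by decide,
      show ("month" ++ "s" : String) = "months" from by decide,
      show ("week" ++ "s" : String) = "weeks" from by decide,
      show ("day" ++ "s" : String) = "days" from by decide,
      show ("quarter" ++ "s" : String) = "quarters" from by decide]
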